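-- pv_equiv track=rewrite | github.com/TUD-INF-IAI-MCI/AGSBS-infrastructure | MAGSBS/mparser/__init__.py | parse_single_dollar_formulas
-- ===== SOURCE A (Python) =====
-- def parse_single_dollar_formulas(document, start_line=1):
--     """This function will parse the given document to extract all single-dollar
--     math environments out of it. Returned is a unsorted dictionary mapping from
--     (line number, position) (both starting from 1) to the content of the
--     formula.
--     Straying $'s are ignored, so i.e.
--
--         blubelidupp $formula$ and $ invalid
--
--     will yield {(1, 13): ...}."""
--     formulas = {}
--     for lnum, line in enumerate(document.split("\n"), start_line):
--         tokens = line.split("$")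
--         if len(tokens) < 3:  # one or less dollars, ignore
--             continue
--         pos = 0
--         is_formula = True  # negated at beginning of iteration; counts whether
--         # current token is a formula or not
--         last_added = None  # last key added to list of formulas
--         for token in tokens:
--             is_formula = not is_formula  # flip flop, flip flop....
--             if is_formula:
--                 last_added = (lnum, pos + 1)  # save last added key
--                 formulas[last_added] = token
--                 pos += 2  # count the two dollars of the math environment
--             pos += len(token)
--         # if not is_formula, an environment was untermined or a dollar not escaped,
--         # discard last formula, possibly whole line is broken
--         if is_formula and last_added in formulas:
--             del formulas[last_added]
--     return formulas
-- ===== SOURCE B (Python) =====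
-- def parse_single_dollar_formulas(document, start_line=1):
--     """Single left-to-right scan per line with str.find: locate each '$'...'$'
--     pair directly; a trailing unpaired '$' simply never closes, so nothing is
--     recorded for it (no token lists, no flip-flop state, no deletion)."""
--     formulas = {}
--     for lnum, line in enumerate(document.split("\n"), start_line):
--         i = line.find("$")
--         while i != -1:
--             j = line.find("$", i + 1)
--             if j == -1:
--                 break
--             formulas[(lnum, i + 1)] = line[i + 1:j]
--             i = line.find("$", j + 1)
--     return formulas
-- ===== Notes on version B (the rewrite author's own statement) =====
-- stated objective: alternative
-- what changed: Per line, A splits on '$' and runs a flip-flop state machine over the token list, deleting the last dict entry again when the line ends inside a formula; B makes a single left-to-right scan with str.find, recording each '$'...'$' pair directly so an unpaired trailing '$' is never recorded in the first place.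
import Mathlib
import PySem

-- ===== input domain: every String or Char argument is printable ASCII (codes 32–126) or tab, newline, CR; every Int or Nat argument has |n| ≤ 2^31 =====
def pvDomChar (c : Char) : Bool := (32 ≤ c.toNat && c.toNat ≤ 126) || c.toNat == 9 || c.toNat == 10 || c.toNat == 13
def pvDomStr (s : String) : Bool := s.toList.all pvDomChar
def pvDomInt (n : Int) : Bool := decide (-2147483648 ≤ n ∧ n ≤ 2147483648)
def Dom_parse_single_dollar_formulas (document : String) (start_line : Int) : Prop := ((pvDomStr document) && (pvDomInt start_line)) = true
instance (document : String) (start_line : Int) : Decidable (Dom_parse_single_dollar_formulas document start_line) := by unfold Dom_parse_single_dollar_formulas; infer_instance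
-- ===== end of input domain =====

-- B replaces A's per-line split('$')/flip-flop state machine (with its trailing dict deletion)
-- by a single left-to-right str.find scan recording each '$'..'$' pair directly (objective: alternative).


-- ===== PORT A =====
-- the body of A's inner `for token in tokens` loop
def pvStepA (lnum : Int) (s : Int × Bool × Option (Int × Int) × PySem.Dict (Int × Int) String)
    (token : String) : Int × Bool × Option (Int × Int) × PySem.Dict (Int × Int) String :=
  match s with
  | (pos, is_formula, last_added, formulas) =>
    let is_formula := !is_formula
    if is_formula then
      let last_added : Int × Int := (lnum, pos + 1)
      (pos + 2 + PySem.Str.len token, is_formula, some last_added, formulas.insert last_added token)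
    else
      (pos + PySem.Str.len token, is_formula, last_added, formulas)

-- one iteration of A's `for lnum, line in enumerate(...)` loop
def pvLineA (formulas : PySem.Dict (Int × Int) String) (lnum : Int) (line : String) :
    PySem.Dict (Int × Int) String :=
  -- '$' is a nonempty separator, so Str.split? is always `some`: `.getD []` is exact
  let tokens := (PySem.Str.split? line "$").getD []
  if tokens.length < 3 then formulas
  else
    let st := tokens.foldl (pvStepA lnum) (0, true, none, formulas)
    -- `last_added in formulas` with last_added = None is False (no key is None): the `none` branch skips
    if st.2.1 then
      match st.2.2.1 with
      | some last_added =>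
          if st.2.2.2.contains last_added then st.2.2.2.erase last_added else st.2.2.2
      | none => st.2.2.2
    else st.2.2.2

def parse_single_dollar_formulas (document : String) (start_line : Int) : List (Int × Int × String) :=
  -- '\n' is a nonempty separator, so Str.split? is always `some`: `.getD []` is exact
  let lines := (PySem.Str.split? document "\n").getD []
  let formulas := (PySem.List.enumerate lines start_line).foldl
    (fun formulas p => pvLineA formulas p.1 p.2) PySem.Dict.empty
  formulas.items.map (fun p => (p.1.1, p.1.2, p.2))

-- ===== PORT B =====
-- B's inner while-loop, ported with fuel (fuel only makes the recursion structural: each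
-- iteration consumes a '$...$' pair, so `line length + 1` iterations always suffice,
-- which is proved in pvLoopB_eq below; the computed value is exactly the Python loop's)
def pvLoopB (line : String) (lnum : Int) (fuel : Nat) (i : Int)
    (formulas : PySem.Dict (Int × Int) String) : PySem.Dict (Int × Int) String :=
  match fuel with
  | 0 => formulas
  | fuel + 1 =>
    if i = -1 then formulas
    else
      let j := PySem.Str.findFrom line "$" (i + 1)
      if j = -1 then formulas
      else
        pvLoopB line lnum fuel (PySem.Str.findFrom line "$" (j + 1))
          (formulas.insert (lnum, i + 1) (PySem.Str.slice line (some (i + 1)) (some j)))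

-- one iteration of B's `for lnum, line in enumerate(...)` loop
def pvLineB (formulas : PySem.Dict (Int × Int) String) (lnum : Int) (line : String) :
    PySem.Dict (Int × Int) String :=
  pvLoopB line lnum (line.toList.length + 1) (PySem.Str.find line "$") formulas

def parse_single_dollar_formulas_alt (document : String) (start_line : Int) : List (Int × Int × String) :=
  -- '\n' is a nonempty separator, so Str.split? is always `some`: `.getD []` is exact
  let lines := (PySem.Str.split? document "\n").getD []
  let formulas := (PySem.List.enumerate lines start_line).foldl
    (fun formulas p => pvLineB formulas p.1 p.2) PySem.Dict.empty
  formulas.items.map (fun p => (p.1.1, p.1.2, p.2))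

-- ===== PRECONDITION & SPEC =====
def Spec_parse_single_dollar_formulas (document : String) (start_line : Int) (out : List (Int × Int × String)) : Prop := out = parse_single_dollar_formulas_alt document start_line
instance (document : String) (start_line : Int) (out : List (Int × Int × String)) : Decidable (Spec_parse_single_dollar_formulas document start_line out) := by unfold Spec_parse_single_dollar_formulas; infer_instance

-- ===== CLAIM (what is proved, stated in full; the proofs are below) =====
def Claim_equal_parse_single_dollar_formulas : Prop := ∀ (document : String) (start_line : Int), Dom_parse_single_dollar_formulas document start_line → Spec_parse_single_dollar_formulas document start_line (parse_single_dollar_formulas document start_line)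

-- ===== LEMMAS AND PROOFS =====

-- reference decomposition of a line at its '$'s (structural version of str.split('$'))
def pvSplitD : List Char → List (List Char)
  | [] => [[]]
  | c :: r =>
    if c = '$' then [] :: pvSplitD r
    else match pvSplitD r with
      | [] => [[c]]
      | h :: t => (c :: h) :: t

-- all formula tokens (odd positions) of a token list, with A's (line, position) keys
def pvAll (lnum : Int) : List (List Char) → Int → List ((Int × Int) × String)
  | a :: b :: r, pos =>
      ((lnum, pos + a.length + 1), String.ofList b) :: pvAll lnum r (pos + a.length + b.length + 2)
  | _, _ => []

-- the formula tokens that are kept: a formula closed by the very last '$' of the line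
-- (no token after it) is dropped
def pvKept (lnum : Int) : List (List Char) → Int → List ((Int × Int) × String)
  | a :: b :: r, pos =>
      if r = [] then []
      else ((lnum, pos + a.length + 1), String.ofList b) :: pvKept lnum r (pos + a.length + b.length + 2)
  | _, _ => []

def pvEndPos : List (List Char) → Int → Int
  | [], pos => pos
  | [a], pos => pos + a.length
  | a :: b :: r, pos => pvEndPos r (pos + a.length + b.length + 2)

def pvLastKey (lnum : Int) : List (List Char) → Int → Option (Int × Int) → Option (Int × Int)
  | [], _, last => last
  | [_], _, last => last
  | a :: b :: r, pos, _ => pvLastKey lnum r (pos + a.length + b.length + 2) (some (lnum, pos + a.length + 1))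

theorem pvSplitD_ne_nil (l : List Char) : pvSplitD l ≠ [] := by
  cases l with
  | nil => simp [pvSplitD]
  | cons c r =>
    simp only [pvSplitD]
    split
    · simp
    · split <;> simp

theorem pvSplitD_no_dollar (l : List Char) (h : ∀ c ∈ l, c ≠ '$') : pvSplitD l = [l] := by
  induction l with
  | nil => rfl
  | cons c r ih =>
    have hc : c ≠ '$' := h c (by simp)
    simp only [pvSplitD, if_neg hc, ih (fun x hx => h x (by simp [hx]))]

theorem pvSplitD_append_no_dollar (t : List Char) (l : List Char) (h : ∀ c ∈ t, c ≠ '$') :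
    pvSplitD (t ++ l) = (t ++ (pvSplitD l).headI) :: (pvSplitD l).tail := by
  induction t with
  | nil =>
    obtain ⟨h0, t0, he⟩ : ∃ h0 t0, pvSplitD l = h0 :: t0 := by
      cases hl : pvSplitD l with
      | nil => exact absurd hl (pvSplitD_ne_nil l)
      | cons a b => exact ⟨a, b, rfl⟩
    simp [he]
  | cons c r ih =>
    have hc : c ≠ '$' := h c (by simp)
    have ih' := ih (fun x hx => h x (by simp [hx]))
    simp only [List.cons_append, pvSplitD, if_neg hc, ih']

theorem pvGo_eq (fuel : Nat) : ∀ (l cur : List Char) (acc : List (List Char)), l.length < fuel →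
    PySem.Chars.splitOn.go ['$'] fuel l cur acc
      = acc.reverse ++ (cur.reverse ++ (pvSplitD l).headI) :: (pvSplitD l).tail := by
  induction fuel with
  | zero => intro l cur acc h; omega
  | succ f ih =>
    intro l cur acc h
    cases l with
    | cons c r =>
      by_cases hc : c = '$'
      · subst hc
        have hpre : List.isPrefixOf ['$'] ('$' :: r) = true := by simp [List.isPrefixOf]
        rw [PySem.Chars.splitOn.go]
        simp only [hpre, if_pos, List.length_cons, List.drop_succ_cons, List.length_nil, List.drop_zero]
        rw [ih r [] (cur.reverse :: acc) (by simpa using Nat.lt_of_succ_lt_succ h)]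
        have hne := pvSplitD_ne_nil r
        cases hr : pvSplitD r with
        | nil => exact absurd hr hne
        | cons a b => simp [pvSplitD, hr]
      · have hpre : List.isPrefixOf ['$'] (c :: r) = false := by
          simp [List.isPrefixOf]; exact fun hx => absurd hx.symm hc
        rw [PySem.Chars.splitOn.go]
        simp only [hpre, Bool.false_eq_true, if_false]
        rw [ih r (c :: cur) acc (by simpa using Nat.lt_of_succ_lt_succ h)]
        have hne := pvSplitD_ne_nil r
        cases hr : pvSplitD r with
        | nil => exact absurd hr hne
        | cons a b => simp [pvSplitD, if_neg hc, hr]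
    | nil => simp [PySem.Chars.splitOn.go, pvSplitD]

theorem pvSplitOn_eq (l : List Char) : PySem.Chars.splitOn l ['$'] = pvSplitD l := by
  unfold PySem.Chars.splitOn
  rw [pvGo_eq (l.length + 1) l [] [] (by omega)]
  have hne := pvSplitD_ne_nil l
  cases hl : pvSplitD l with
  | nil => exact absurd hl hne
  | cons a b => simp

theorem pvFoldA_eq (lnum : Int) (ts : List (List Char)) (pos : Int) : ∀ (last : Option (Int × Int))
    (d : PySem.Dict (Int × Int) String),
    List.foldl (pvStepA lnum) (pos, true, last, d) (ts.map String.ofList)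
      = (pvEndPos ts pos, decide (ts.length % 2 = 0), pvLastKey lnum ts pos last,
         (pvAll lnum ts pos).foldl (fun d p => d.insert p.1 p.2) d) := by
  induction ts, pos using pvEndPos.induct with
  | case1 pos => intro last d; simp [pvEndPos, pvLastKey, pvAll]
  | case2 a pos =>
    intro last d
    simp [pvStepA, pvEndPos, pvLastKey, pvAll, PySem.Str.len_eq]
  | case3 a b r pos ih =>
    intro last d
    simp only [List.map_cons, List.foldl_cons]
    have h1 : pvStepA lnum (pos, true, last, d) (String.ofList a)
        = (pos + a.length, false, last, d) := by
      simp [pvStepA, PySem.Str.len_eq]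
    have h2 : pvStepA lnum (pos + (a.length : Int), false, last, d) (String.ofList b)
        = (pos + a.length + 2 + b.length, true, some (lnum, pos + a.length + 1),
           d.insert (lnum, pos + a.length + 1) (String.ofList b)) := by
      simp [pvStepA, PySem.Str.len_eq]
    have hp : (pos + a.length + 2 + (b.length : Int)) = pos + a.length + b.length + 2 := by ring
    rw [h1, h2, hp, ih]
    have hm : (r.length + 1 + 1) % 2 = r.length % 2 := by omega
    simp only [pvEndPos, pvLastKey, pvAll, List.foldl_cons, List.length_cons, hm]

theorem pvAll_keys (lnum : Int) (ts : List (List Char)) (pos : Int) :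
    (∀ p ∈ pvAll lnum ts pos, p.1.1 = lnum ∧ pos + 1 ≤ p.1.2)
      ∧ (pvAll lnum ts pos).Pairwise (fun p q => p.1.2 < q.1.2) := by
  induction ts, pos using pvEndPos.induct with
  | case1 pos => simp [pvAll]
  | case2 a pos => simp [pvAll]
  | case3 a b r pos ih =>
    simp only [pvAll]
    constructor
    · intro p hp
      rcases List.mem_cons.mp hp with hp | hp
      · subst hp; simp
      · have := ih.1 p hp
        refine ⟨this.1, by omega⟩
    · refine List.Pairwise.cons ?_ ih.2
      intro q hq
      have := ih.1 q hq
      simp only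
      omega

theorem pvOdd_kept (lnum : Int) (ts : List (List Char)) (pos : Int) (h : ts.length % 2 = 1) :
    pvKept lnum ts pos = pvAll lnum ts pos := by
  induction ts, pos using pvEndPos.induct with
  | case1 pos => simp at h
  | case2 a pos => simp [pvKept, pvAll]
  | case3 a b r pos ih =>
    have hr : r ≠ [] := by
      intro he; subst he; simp at h
    have hlen : r.length % 2 = 1 := by simp at h; omega
    simp [pvKept, pvAll, hr, ih hlen]

theorem pvEven_decomp (lnum : Int) (ts : List (List Char)) (pos : Int) : ∀ (last : Option (Int × Int)),
    ts.length % 2 = 0 → ts ≠ [] →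
    ∃ k v, pvAll lnum ts pos = pvKept lnum ts pos ++ [(k, v)]
      ∧ pvLastKey lnum ts pos last = some k := by
  induction ts, pos using pvEndPos.induct with
  | case1 pos => intro last h hne; exact absurd rfl hne
  | case2 a pos => intro last h hne; simp at h
  | case3 a b r pos ih =>
    intro last h hne
    by_cases hr : r = []
    · subst hr
      exact ⟨(lnum, pos + a.length + 1), String.ofList b, by simp [pvAll, pvKept], by simp [pvLastKey]⟩
    · have hlen : r.length % 2 = 0 := by simp at h; omega
      obtain ⟨k, v, h1, h2⟩ := ih (some (lnum, pos + a.length + 1)) hlen hr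
      exact ⟨k, v, by simp [pvAll, pvKept, hr, h1], by simp [pvLastKey, h2]⟩

theorem pvTokens_eq (line : String) :
    (PySem.Str.split? line "$").getD [] = (pvSplitD line.toList).map String.ofList := by
  have h : ("$" : String).toList = ['$'] := rfl
  simp [PySem.Str.split?, PySem.Chars.split?, h, pvSplitOn_eq]

theorem pvKept_small (lnum : Int) (ts : List (List Char)) (pos : Int) (h : ts.length < 3) :
    pvKept lnum ts pos = [] := by
  match ts with
  | [] => rfl
  | [a] => rfl
  | [a, b] => simp [pvKept]
  | a :: b :: c :: r => simp at h; omega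

theorem pvFresh (d : PySem.Dict (Int × Int) String) (lnum : Int)
    (hfresh : ∀ k ∈ d.keys, k.1 ≠ lnum) (ts : List (List Char)) (pos : Int) :
    ∀ p ∈ pvAll lnum ts pos, d.contains p.1 = false := by
  intro p hp
  have h1 := (pvAll_keys lnum ts pos).1 p hp
  cases hc : d.contains p.1
  · rfl
  · exact absurd h1.1 (hfresh _ ((PySem.Dict.contains_iff_mem_keys _ _).mp hc))

theorem pvNodupKeys (lnum : Int) (ts : List (List Char)) (pos : Int) :
    ((pvAll lnum ts pos).map Prod.fst).Nodup := by
  have h2 := (pvAll_keys lnum ts pos).2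
  exact (List.pairwise_map).mpr (h2.imp (fun hlt he => by rw [he] at hlt; exact lt_irrefl _ hlt))

-- A's per-line result: the old dict plus the kept formulas of the line
theorem pvLineA_eq (d : PySem.Dict (Int × Int) String) (lnum : Int) (line : String)
    (hfresh : ∀ k ∈ d.keys, k.1 ≠ lnum) :
    pvLineA d lnum line = PySem.Dict.mk (d.items ++ pvKept lnum (pvSplitD line.toList) 0) := by
  unfold pvLineA
  rw [pvTokens_eq]
  simp only [List.length_map]
  have hfold := PySem.Dict.items_foldl_insert_fresh (pvAll lnum (pvSplitD line.toList) 0)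
      Prod.fst Prod.snd d (pvFresh d lnum hfresh _ 0) (pvNodupKeys lnum _ 0)
  by_cases hlen : (pvSplitD line.toList).length < 3
  · rw [if_pos hlen, pvKept_small lnum _ 0 hlen]
    exact PySem.Dict.ext (by simp)
  · rw [if_neg hlen, pvFoldA_eq]
    by_cases hpar : (pvSplitD line.toList).length % 2 = 0
    · obtain ⟨k, v, hAll, hLast⟩ := pvEven_decomp lnum (pvSplitD line.toList) 0 none hpar
        (by intro he; rw [he] at hlen; simp at hlen)
    -- even number of tokens: flip-flop ends on a formula, A deletes the last entry
      simp only [hpar, decide_true, hLast, if_pos]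
      have hkl : k.1 = lnum := ((pvAll_keys lnum (pvSplitD line.toList) 0).1 (k, v)
        (by simp [hAll])).1
      have hkept : ∀ p ∈ pvKept lnum (pvSplitD line.toList) 0, p.1 ≠ k := by
        have h2 := (pvAll_keys lnum (pvSplitD line.toList) 0).2
        rw [hAll] at h2
        intro p hp he
        have := (List.pairwise_append.mp h2).2.2 p hp (k, v) (by simp)
        rw [he] at this
        exact lt_irrefl _ this
      have hcont : (List.foldl (fun d p => d.insert p.1 p.2) d
          (pvAll lnum (pvSplitD line.toList) 0)).contains k = true := by
        rw [hAll, List.foldl_append]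
        simp only [List.foldl_cons, List.foldl_nil]
        exact PySem.Dict.contains_insert_self _ _ _
      rw [if_pos hcont]
      apply PySem.Dict.ext
      simp only [PySem.Dict.erase]
      rw [hfold]
      simp only [List.map_id_fun', id]
      rw [hAll, List.filter_append, List.filter_append]
      have hd : List.filter (fun p => !p.1 == k) d.items = d.items :=
        List.filter_eq_self.mpr (fun p hp => by
          simp only [Bool.not_eq_eq_eq_not, Bool.not_true, beq_eq_false_iff_ne]
          intro he
          exact hfresh p.1 (List.mem_map_of_mem hp) (he ▸ hkl))
      have hk2 : List.filter (fun p => !p.1 == k) (pvKept lnum (pvSplitD line.toList) 0)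
          = pvKept lnum (pvSplitD line.toList) 0 :=
        List.filter_eq_self.mpr (fun p hp => by
          simp only [Bool.not_eq_eq_eq_not, Bool.not_true, beq_eq_false_iff_ne]
          exact hkept p hp)
      simp [hd, hk2]
    -- odd number of tokens: every formula is kept, no deletion
    · have hodd : (pvSplitD line.toList).length % 2 = 1 := by omega
      simp only [hpar, decide_false, Bool.false_eq_true, if_false]
      apply PySem.Dict.ext
      rw [hfold, pvOdd_kept lnum _ 0 hodd]
      simp

-- find/findFrom/slice on '$', related to takeWhile/dropWhile
theorem pvFindGo (l : List Char) : ∀ k : Nat, PySem.Chars.find.go ['$'] l k =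
    if (l.takeWhile (fun c => !(c == '$'))).length = l.length then -1
    else (k : Int) + (l.takeWhile (fun c => !(c == '$'))).length := by
  induction l with
  | nil => intro k; simp [PySem.Chars.find.go]
  | cons c r ih =>
    intro k
    by_cases hc : c = '$'
    · subst hc
      have hpre : List.isPrefixOf ['$'] ('$' :: r) = true := by simp [List.isPrefixOf]
      rw [PySem.Chars.find.go]
      simp [hpre]
    · have hpre : List.isPrefixOf ['$'] (c :: r) = false := by
        simp [List.isPrefixOf]; exact fun hx => absurd hx.symm hc
      rw [PySem.Chars.find.go]
      simp only [hpre, Bool.false_eq_true, if_false, ih (k + 1)]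
      have hb : (!(c == '$')) = true := by simp [hc]
      simp only [List.takeWhile_cons, hb, if_pos, List.length_cons]
      split
      · rw [if_pos (by omega)]
      · rw [if_neg (by omega)]
        push_cast; ring

theorem pvFind_eq (l : List Char) : PySem.Chars.find l ['$'] =
    if (l.takeWhile (fun c => !(c == '$'))).length = l.length then -1
    else ((l.takeWhile (fun c => !(c == '$'))).length : Int) := by
  have := pvFindGo l 0
  simpa [PySem.Chars.find] using this

theorem pvNoDollar_of_takeWhile {l : List Char} (h : (l.takeWhile (fun c => !(c == '$'))).length = l.length) :
    ∀ c ∈ l, c ≠ '$' := by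
  have he : l.takeWhile (fun c => !(c == '$')) = l :=
    (List.takeWhile_prefix _).eq_of_length h
  intro c hc
  have := List.mem_takeWhile_imp (he ▸ hc)
  simpa using this

theorem pvDropWhile_cons {l : List Char} (h : ¬ (l.takeWhile (fun c => !(c == '$'))).length = l.length) :
    ∃ r, l.dropWhile (fun c => !(c == '$')) = '$' :: r := by
  cases hd : l.dropWhile (fun c => !(c == '$')) with
  | nil =>
    exfalso
    have := List.takeWhile_append_dropWhile (p := fun c => !(c == '$')) (l := l)
    rw [hd, List.append_nil] at this
    exact h (by rw [this])
  | cons c r =>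
    have hne : l.dropWhile (fun c => !(c == '$')) ≠ [] := by simp [hd]
    have hc := List.head_dropWhile_not (fun c => !(c == '$')) hne
    simp only [hd, List.head_cons] at hc
    have : c = '$' := by simpa using hc
    exact ⟨r, by rw [← this]⟩

theorem pvLoopB_eq (line : String) (lnum : Int) : ∀ (fuel n : Nat)
    (d : PySem.Dict (Int × Int) String), n ≤ line.toList.length → line.toList.length - n < fuel →
    pvLoopB line lnum fuel
        (if PySem.Chars.find (line.toList.drop n) ['$'] = -1 then -1
         else (n : Int) + PySem.Chars.find (line.toList.drop n) ['$']) d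
      = (pvKept lnum (pvSplitD (line.toList.drop n)) n).foldl (fun d p => d.insert p.1 p.2) d := by
  intro fuel
  induction fuel with
  | zero => intro n d hn hf; omega
  | succ f ih =>
    intro n d hn hf
    have hdollar : ("$" : String).toList = ['$'] := rfl
    set l := line.toList with hl
    set s := l.drop n with hs
    set t := s.takeWhile (fun c => !(c == '$')) with ht
    have hslen : s.length = l.length - n := by rw [hs]; simp
    by_cases h1 : t.length = s.length
    · -- no '$' in the rest of the line: find = -1, loop exits, no formula kept
      have hnd := pvNoDollar_of_takeWhile (ht ▸ h1)
      rw [pvFind_eq, ← ht, if_pos h1, pvSplitD_no_dollar s hnd]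
      simp [pvLoopB, pvKept]
    · obtain ⟨r2, hr2⟩ := pvDropWhile_cons (ht ▸ h1)
      have hts : t ++ '$' :: r2 = s := by rw [ht, ← hr2]; exact List.takeWhile_append_dropWhile
      have htlen : t.length < s.length := by
        have := congrArg List.length hts; simp at this; omega
      have htnd : ∀ c ∈ t, c ≠ '$' := by
        intro c hc
        have := List.mem_takeWhile_imp (ht ▸ hc)
        simpa using this
      rw [pvFind_eq, ← ht, if_neg h1]
      rw [pvLoopB]
      rw [if_neg (by omega)]
      have hix : (if (t.length : Int) = -1 then (-1 : Int) else (n : Int) + t.length)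
          = (n : Int) + t.length := if_neg (by omega)
      rw [hix]
      have hi1 : ((n : Int) + t.length) + 1 = ((n + t.length + 1 : Nat) : Int) := by push_cast; ring
      have hk1 : n + t.length + 1 ≤ l.length := by omega
      have hdrop1 : l.drop (n + t.length + 1) = r2 := by
        have hdd : l.drop (n + (t.length + 1)) = (l.drop n).drop (t.length + 1) := (List.drop_drop).symm
        have ha : t.length + 1 = (t ++ ['$']).length := by simp
        have hb : t ++ '$' :: r2 = (t ++ ['$']) ++ r2 := by simp
        have : (n + t.length + 1) = n + (t.length + 1) := by omega
        rw [this, hdd, ← hs, ← hts, hb, ha, List.drop_left]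
      have hfj : PySem.Str.findFrom line "$" (((n : Int) + t.length) + 1)
          = if PySem.Chars.find r2 ['$'] = -1 then -1
            else ((n + t.length + 1 : Nat) : Int) + PySem.Chars.find r2 ['$'] := by
        rw [PySem.Str.findFrom_eq, hdollar, ← hl, hi1,
          PySem.Chars.findFrom_natCast l ['$'] _ hk1, hdrop1]
      set t2 := r2.takeWhile (fun c => !(c == '$')) with ht2
      by_cases h2 : t2.length = r2.length
      · -- second '$' never comes: the loop breaks, the open formula is dropped
        have hnd2 := pvNoDollar_of_takeWhile (ht2 ▸ h2)
        rw [hfj, pvFind_eq, ← ht2, if_pos h2]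
        simp only []
        rw [← hts, pvSplitD_append_no_dollar t _ htnd]
        have hx : pvSplitD ('$' :: r2) = [] :: pvSplitD r2 := by simp [pvSplitD]
        rw [hx, pvSplitD_no_dollar r2 hnd2]
        simp [pvKept]
      · obtain ⟨r3, hr3⟩ := pvDropWhile_cons (ht2 ▸ h2)
        have hts2 : t2 ++ '$' :: r3 = r2 := by rw [ht2, ← hr3]; exact List.takeWhile_append_dropWhile
        have ht2len : t2.length < r2.length := by
          have := congrArg List.length hts2; simp at this; omega
        have ht2nd : ∀ c ∈ t2, c ≠ '$' := by
          intro c hc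
          have := List.mem_takeWhile_imp (ht2 ▸ hc)
          simpa using this
        have hlens : l.length = n + t.length + 1 + t2.length + 1 + r3.length := by
          have h1' := congrArg List.length hts
          have h2' := congrArg List.length hts2
          simp at h1' h2'
          omega
        rw [hfj, pvFind_eq, ← ht2, if_neg h2]
        rw [if_neg (by omega), if_neg (by omega)]
        -- the recorded formula is exactly the text between the two dollars
        have hslice : PySem.Str.slice line (some (((n : Int) + t.length) + 1))
            (some (((n + t.length + 1 : Nat) : Int) + t2.length))
            = String.ofList t2 := by
          have hb : ((n + t.length + 1 : Nat) : Int) + t2.length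
              = ((n + t.length + 1 + t2.length : Nat) : Int) := by push_cast; ring
          have : (PySem.Str.slice line (some (((n : Int) + t.length) + 1))
              (some (((n + t.length + 1 : Nat) : Int) + t2.length))).toList = t2 := by
            rw [PySem.Str.toList_slice, hi1, hb, PySem.Chars.slice_eq_listSlice,
              PySem.List.slice_natCast, ← hl, hdrop1]
            have hc : n + t.length + 1 + t2.length - (n + t.length + 1) = t2.length := by omega
            rw [hc, ← hts2, List.take_left]
          have h' := congrArg String.ofList this
          rwa [String.ofList_toList] at h'
        rw [hslice]
        -- next search start: just after the closing dollar
        have hk2 : n + t.length + 1 + t2.length + 1 ≤ l.length := by omega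
        have hdrop2 : l.drop (n + t.length + 1 + t2.length + 1) = r3 := by
          have hdd : l.drop (n + t.length + 1 + (t2.length + 1))
              = (l.drop (n + t.length + 1)).drop (t2.length + 1) := (List.drop_drop).symm
          have ha : t2.length + 1 = (t2 ++ ['$']).length := by simp
          have hb : t2 ++ '$' :: r3 = (t2 ++ ['$']) ++ r3 := by simp
          have hx : (n + t.length + 1 + t2.length + 1) = n + t.length + 1 + (t2.length + 1) := by omega
          rw [hx, hdd, hdrop1, ← hts2, hb, ha, List.drop_left]
        have hi2 : ((n + t.length + 1 : Nat) : Int) + t2.length + 1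
            = ((n + t.length + 1 + t2.length + 1 : Nat) : Int) := by push_cast; ring
        have hfj2 : PySem.Str.findFrom line "$" (((n + t.length + 1 : Nat) : Int) + t2.length + 1)
            = if PySem.Chars.find r3 ['$'] = -1 then -1
              else ((n + t.length + 1 + t2.length + 1 : Nat) : Int) + PySem.Chars.find r3 ['$'] := by
          rw [PySem.Str.findFrom_eq, hdollar, ← hl, hi2,
            PySem.Chars.findFrom_natCast l ['$'] _ hk2, hdrop2]
        have ihx := ih (n + t.length + 1 + t2.length + 1)
          (d.insert (lnum, (n : Int) + t.length + 1) (String.ofList t2)) hk2 (by omega)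
        rw [hdrop2] at ihx
        rw [hfj2, ihx]
        -- and the token decomposition of the rest of the line
        rw [← hts, pvSplitD_append_no_dollar t _ htnd]
        have hx : pvSplitD ('$' :: r2) = [] :: pvSplitD r2 := by simp [pvSplitD]
        rw [hx, ← hts2, pvSplitD_append_no_dollar t2 _ ht2nd]
        have hy : pvSplitD ('$' :: r3) = [] :: pvSplitD r3 := by simp [pvSplitD]
        rw [hy]
        simp only [List.headI, List.tail, List.append_nil]
        have hz := pvSplitD_ne_nil r3
        cases hsd : pvSplitD r3 with
        | nil => exact absurd hsd hz
        | cons a b =>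
          simp only [pvKept]
          rw [if_neg (by simp), List.foldl_cons]
          have hcast : ((n + t.length + 1 + t2.length + 1 : Nat) : Int)
              = (n : Int) + t.length + t2.length + 2 := by push_cast; ring
          rw [hcast]


theorem pvKept_sublist (lnum : Int) (ts : List (List Char)) (pos : Int) :
    List.Sublist (pvKept lnum ts pos) (pvAll lnum ts pos) := by
  induction ts, pos using pvEndPos.induct with
  | case1 pos => simp [pvKept, pvAll]
  | case2 a pos => simp [pvKept, pvAll]
  | case3 a b r pos ih =>
    by_cases hr : r = []
    · subst hr; simp [pvKept, pvAll]
    · simp only [pvKept, pvAll, if_neg hr]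
      exact ih.cons₂ _

-- B's per-line result: the old dict plus the kept formulas of the line
theorem pvLineB_eq (d : PySem.Dict (Int × Int) String) (lnum : Int) (line : String)
    (hfresh : ∀ k ∈ d.keys, k.1 ≠ lnum) :
    pvLineB d lnum line = PySem.Dict.mk (d.items ++ pvKept lnum (pvSplitD line.toList) 0) := by
  unfold pvLineB
  have h0 : PySem.Str.find line "$"
      = (if PySem.Chars.find (line.toList.drop 0) ['$'] = -1 then -1
         else ((0 : Nat) : Int) + PySem.Chars.find (line.toList.drop 0) ['$']) := by
    rw [PySem.Str.find_eq]
    have hdollar : ("$" : String).toList = ['$'] := rfl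
    rw [hdollar]
    simp only [List.drop_zero, Nat.cast_zero, zero_add]
    split
    · rename_i h; rw [h]
    · rfl
  rw [h0, pvLoopB_eq line lnum (line.toList.length + 1) 0 d (by omega) (by omega)]
  apply PySem.Dict.ext
  have hsub := pvKept_sublist lnum (pvSplitD line.toList) 0
  have hfr : ∀ p ∈ pvKept lnum (pvSplitD line.toList) 0, d.contains p.1 = false :=
    fun p hp => pvFresh d lnum hfresh _ 0 p (hsub.subset hp)
  have hnd2 : ((pvKept lnum (pvSplitD line.toList) 0).map Prod.fst).Nodup :=
    (pvNodupKeys lnum _ 0).sublist (hsub.map Prod.fst)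
  simp only [List.drop_zero, Nat.cast_zero]
  rw [PySem.Dict.items_foldl_insert_fresh _ Prod.fst Prod.snd d hfr hnd2]
  simp

theorem pvOuter (lines : List String) : ∀ (lnum : Int) (d : PySem.Dict (Int × Int) String),
    d.keys.Nodup → (∀ k ∈ d.keys, k.1 < lnum) →
    (PySem.List.enumerate lines lnum).foldl (fun formulas p => pvLineA formulas p.1 p.2) d
      = (PySem.List.enumerate lines lnum).foldl (fun formulas p => pvLineB formulas p.1 p.2) d := by
  induction lines with
  | nil => intro lnum d _ _; rfl
  | cons line rest ih =>
    intro lnum d hnd hlt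
    rw [PySem.List.enumerate_cons]
    simp only [List.foldl_cons]
    have hne : ∀ k ∈ d.keys, k.1 ≠ lnum := fun k hk => ne_of_lt (hlt k hk)
    rw [pvLineA_eq d lnum line hne, pvLineB_eq d lnum line hne]
    have hsub := pvKept_sublist lnum (pvSplitD line.toList) 0
    have hmem : ∀ p ∈ pvKept lnum (pvSplitD line.toList) 0, p.1.1 = lnum :=
      fun p hp => ((pvAll_keys lnum _ 0).1 p (hsub.subset hp)).1
    have hkeys : (PySem.Dict.mk (d.items ++ pvKept lnum (pvSplitD line.toList) 0)).keys
        = d.keys ++ (pvKept lnum (pvSplitD line.toList) 0).map Prod.fst := by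
      simp [PySem.Dict.keys]
    apply ih
    · rw [hkeys]
      refine List.Nodup.append hnd ((pvNodupKeys lnum _ 0).sublist (hsub.map Prod.fst)) ?_
      intro k hk1 hk2
      obtain ⟨p, hp, hpk⟩ := List.mem_map.mp hk2
      exact (hpk ▸ hne k hk1 : k.1 ≠ lnum) (hpk ▸ hmem p hp)
    · intro k hk
      rw [hkeys] at hk
      rcases List.mem_append.mp hk with hk | hk
      · exact lt_trans (hlt k hk) (by omega)
      · obtain ⟨p, hp, hpk⟩ := List.mem_map.mp hk
        rw [← hpk, hmem p hp]
        omega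

-- ===== VERDICT (by name: the statement is the Claim_ definition above) =====
theorem parse_single_dollar_formulas_spec : Claim_equal_parse_single_dollar_formulas := by
  intro document start_line _
  unfold Spec_parse_single_dollar_formulas
  unfold parse_single_dollar_formulas parse_single_dollar_formulas_alt
  simp only
  rw [pvOuter]
  · simp [PySem.Dict.keys, PySem.Dict.empty]
  · simp [PySem.Dict.keys, PySem.Dict.empty]
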